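-- pv_equiv track=rewrite | github.com/vivo50kff/linux-6.8 | yat_test/scheduler_performance_analyzer.py | group_functions_by_purpose
-- ===== SOURCE A (Python) =====
-- def group_functions_by_purpose(function_times):
--     """按功能对函数进行分组"""
--     groups = {
--         'dequeue': [],
--         'enqueue': [],
--         'pick_next': [],
--         'task_tick': [],
--         'select_task_rq': [],
--         'put_prev': [],
--         # 'balance': [],  # 注释掉负载均衡
--         # 'wakeup_preempt': [],  # 注释掉抢占
--         'update_curr': []
--     }
--
--     for func_name, times in function_times.items():
--         if 'dequeue' in func_name:
--             groups['dequeue'].extend(times)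
--         elif 'enqueue' in func_name:
--             groups['enqueue'].extend(times)
--         elif 'pick_next' in func_name:
--             groups['pick_next'].extend(times)
--         elif 'task_tick' in func_name:
--             groups['task_tick'].extend(times)
--         elif 'select_task_rq' in func_name:
--             groups['select_task_rq'].extend(times)
--         elif 'put_prev' in func_name:  # 重新添加put_prev
--             groups['put_prev'].extend(times)
--         # elif 'balance' in func_name:  # 注释掉负载均衡
--         #     groups['balance'].extend(times)
--         # elif 'wakeup_preempt' in func_name:  # 注释掉抢占
--         #     groups['wakeup_preempt'].extend(times)
--         elif 'update_curr' in func_name: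
--             groups['update_curr'].extend(times)
--
--     return groups
-- ===== SOURCE B (Python) =====
-- GROUP_KEYS = ['dequeue', 'enqueue', 'pick_next', 'task_tick',
--               'select_task_rq', 'put_prev', 'update_curr']
--
--
-- def _classify(func_name):
--     """Index of the first group key that is a substring of func_name, or -1."""
--     for idx, key in enumerate(GROUP_KEYS):
--         if key in func_name:
--             return idx
--     return -1
--
--
-- def group_functions_by_purpose(function_times):
--     """按功能对函数进行分组 (classify once, then build each group's list directly)"""
--     labeled = [(_classify(name), times) for name, times in function_times.items()]
--     return {key: [t for idx, times in labeled if idx == i for t in times]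
--             for i, key in enumerate(GROUP_KEYS)}
-- ===== Notes on version B (the rewrite author's own statement) =====
-- stated objective: alternative
-- what changed: B builds the result group-major: it classifies every function name once into a group index, then constructs each group's value list directly by gathering the times of entries with that index, instead of A's entry-major loop that mutates a pre-built dict through a seven-branch elif chain.
import Mathlib
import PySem

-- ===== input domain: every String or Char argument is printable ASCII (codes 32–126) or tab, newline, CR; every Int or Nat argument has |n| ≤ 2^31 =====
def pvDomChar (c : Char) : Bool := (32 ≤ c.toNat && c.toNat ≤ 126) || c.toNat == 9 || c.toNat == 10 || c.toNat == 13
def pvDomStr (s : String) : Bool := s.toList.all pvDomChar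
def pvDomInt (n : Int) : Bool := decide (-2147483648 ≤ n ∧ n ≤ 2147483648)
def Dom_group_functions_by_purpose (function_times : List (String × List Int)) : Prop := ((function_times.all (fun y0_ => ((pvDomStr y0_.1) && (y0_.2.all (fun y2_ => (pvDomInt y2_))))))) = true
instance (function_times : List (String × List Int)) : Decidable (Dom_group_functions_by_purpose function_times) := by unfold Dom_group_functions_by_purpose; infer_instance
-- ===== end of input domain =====

-- B replaces A's entry-major loop (mutating a pre-built dict through an elif chain) by a
-- group-major construction: classify each name once, then build each group's list directly
-- (objective: alternative; same cost).

-- ===== PORT A =====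
def group_functions_by_purpose (function_times : List (String × List Int)) : List (String × List Int) :=
  let groups : PySem.Dict String (List Int) :=
    PySem.Dict.ofList [("dequeue", []), ("enqueue", []), ("pick_next", []),
      ("task_tick", []), ("select_task_rq", []), ("put_prev", []), ("update_curr", [])]
  let groups := function_times.foldl (fun g p =>
    let func_name := p.1
    let times := p.2
    if PySem.Str.isIn "dequeue" func_name then g.modify "dequeue" [] (· ++ times)
    else if PySem.Str.isIn "enqueue" func_name then g.modify "enqueue" [] (· ++ times)
    else if PySem.Str.isIn "pick_next" func_name then g.modify "pick_next" [] (· ++ times)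
    else if PySem.Str.isIn "task_tick" func_name then g.modify "task_tick" [] (· ++ times)
    else if PySem.Str.isIn "select_task_rq" func_name then g.modify "select_task_rq" [] (· ++ times)
    else if PySem.Str.isIn "put_prev" func_name then g.modify "put_prev" [] (· ++ times)
    else if PySem.Str.isIn "update_curr" func_name then g.modify "update_curr" [] (· ++ times)
    else g) groups
  groups.items

-- ===== PORT B =====
def pvGroupKeys : List String :=
  ["dequeue", "enqueue", "pick_next", "task_tick", "select_task_rq", "put_prev", "update_curr"]

-- Source B's _classify: 'for idx, key in enumerate(GROUP_KEYS): if key in func_name: return idx' / -1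
def pvClassifyAux (ks : List (Int × String)) (func_name : String) : Int :=
  match ks with
  | [] => -1
  | (idx, key) :: rest =>
      if PySem.Str.isIn key func_name then idx else pvClassifyAux rest func_name

def pvClassify (func_name : String) : Int :=
  pvClassifyAux (PySem.List.enumerate pvGroupKeys) func_name

def group_functions_by_purpose_alt (function_times : List (String × List Int)) : List (String × List Int) :=
  let labeled := function_times.map (fun p => (pvClassify p.1, p.2))
  (PySem.List.enumerate pvGroupKeys).map (fun q =>
    (q.2, (labeled.filter (fun r => r.1 == q.1)).flatMap (fun r => r.2)))

-- ===== PRECONDITION & SPEC =====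
def Spec_group_functions_by_purpose (function_times : List (String × List Int)) (out : List (String × List Int)) : Prop := out = group_functions_by_purpose_alt function_times
instance (function_times : List (String × List Int)) (out : List (String × List Int)) : Decidable (Spec_group_functions_by_purpose function_times out) := by unfold Spec_group_functions_by_purpose; infer_instance

-- ===== CLAIM (what is proved, stated in full; the proofs are below) =====
def Claim_equal_group_functions_by_purpose : Prop := ∀ (function_times : List (String × List Int)), Dom_group_functions_by_purpose function_times → Spec_group_functions_by_purpose function_times (group_functions_by_purpose function_times)

-- ===== LEMMAS AND PROOFS =====

-- the dict A maintains, as a function of its seven value lists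
def pvMkD (v0 v1 v2 v3 v4 v5 v6 : List Int) : PySem.Dict String (List Int) :=
  PySem.Dict.ofList [("dequeue", v0), ("enqueue", v1), ("pick_next", v2),
    ("task_tick", v3), ("select_task_rq", v4), ("put_prev", v5), ("update_curr", v6)]

theorem pvModify0 (v0 v1 v2 v3 v4 v5 v6 ts : List Int) :
    (pvMkD v0 v1 v2 v3 v4 v5 v6).modify "dequeue" [] (· ++ ts) = pvMkD (v0 ++ ts) v1 v2 v3 v4 v5 v6 := rfl

theorem pvModify1 (v0 v1 v2 v3 v4 v5 v6 ts : List Int) :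
    (pvMkD v0 v1 v2 v3 v4 v5 v6).modify "enqueue" [] (· ++ ts) = pvMkD v0 (v1 ++ ts) v2 v3 v4 v5 v6 := rfl

theorem pvModify2 (v0 v1 v2 v3 v4 v5 v6 ts : List Int) :
    (pvMkD v0 v1 v2 v3 v4 v5 v6).modify "pick_next" [] (· ++ ts) = pvMkD v0 v1 (v2 ++ ts) v3 v4 v5 v6 := rfl

theorem pvModify3 (v0 v1 v2 v3 v4 v5 v6 ts : List Int) :
    (pvMkD v0 v1 v2 v3 v4 v5 v6).modify "task_tick" [] (· ++ ts) = pvMkD v0 v1 v2 (v3 ++ ts) v4 v5 v6 := rfl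

theorem pvModify4 (v0 v1 v2 v3 v4 v5 v6 ts : List Int) :
    (pvMkD v0 v1 v2 v3 v4 v5 v6).modify "select_task_rq" [] (· ++ ts) = pvMkD v0 v1 v2 v3 (v4 ++ ts) v5 v6 := rfl

theorem pvModify5 (v0 v1 v2 v3 v4 v5 v6 ts : List Int) :
    (pvMkD v0 v1 v2 v3 v4 v5 v6).modify "put_prev" [] (· ++ ts) = pvMkD v0 v1 v2 v3 v4 (v5 ++ ts) v6 := rfl

theorem pvModify6 (v0 v1 v2 v3 v4 v5 v6 ts : List Int) :
    (pvMkD v0 v1 v2 v3 v4 v5 v6).modify "update_curr" [] (· ++ ts) = pvMkD v0 v1 v2 v3 v4 v5 (v6 ++ ts) := rfl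

-- the times B gathers into group j
def pvG (j : Int) (l : List (String × List Int)) : List Int :=
  ((l.map (fun p => (pvClassify p.1, p.2))).filter (fun r => r.1 == j)).flatMap (fun r => r.2)

theorem pvG_cons (j : Int) (p : String × List Int) (l : List (String × List Int)) :
    pvG j (p :: l) = if pvClassify p.1 == j then p.2 ++ pvG j l else pvG j l := by
  simp only [pvG, List.map_cons, List.filter_cons]
  by_cases h : pvClassify p.1 == j <;> simp [h]

set_option maxHeartbeats 1000000 in
theorem pv_foldA (l : List (String × List Int)) (v0 v1 v2 v3 v4 v5 v6 : List Int) :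
    l.foldl (fun g p =>
      if PySem.Str.isIn "dequeue" p.1 then g.modify "dequeue" [] (· ++ p.2)
      else if PySem.Str.isIn "enqueue" p.1 then g.modify "enqueue" [] (· ++ p.2)
      else if PySem.Str.isIn "pick_next" p.1 then g.modify "pick_next" [] (· ++ p.2)
      else if PySem.Str.isIn "task_tick" p.1 then g.modify "task_tick" [] (· ++ p.2)
      else if PySem.Str.isIn "select_task_rq" p.1 then g.modify "select_task_rq" [] (· ++ p.2)
      else if PySem.Str.isIn "put_prev" p.1 then g.modify "put_prev" [] (· ++ p.2)
      else if PySem.Str.isIn "update_curr" p.1 then g.modify "update_curr" [] (· ++ p.2)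
      else g) (pvMkD v0 v1 v2 v3 v4 v5 v6)
    = pvMkD (v0 ++ pvG 0 l) (v1 ++ pvG 1 l) (v2 ++ pvG 2 l) (v3 ++ pvG 3 l)
        (v4 ++ pvG 4 l) (v5 ++ pvG 5 l) (v6 ++ pvG 6 l) := by


  induction l generalizing v0 v1 v2 v3 v4 v5 v6 with
  | nil => simp [pvG]
  | cons p tl ih =>
      have hcl : pvClassify p.1 =
        (if PySem.Str.isIn "dequeue" p.1 then 0
         else if PySem.Str.isIn "enqueue" p.1 then 1
         else if PySem.Str.isIn "pick_next" p.1 then 2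
         else if PySem.Str.isIn "task_tick" p.1 then 3
         else if PySem.Str.isIn "select_task_rq" p.1 then 4
         else if PySem.Str.isIn "put_prev" p.1 then 5
         else if PySem.Str.isIn "update_curr" p.1 then 6
         else -1) := by
        rfl
      simp only [List.foldl_cons]
      split_ifs with h0 h1 h2 h3 h4 h5 h6
      · rw [pvModify0, ih]
        simp only [pvG_cons, hcl, h0]
        norm_num [List.append_assoc]
      · rw [pvModify1, ih]
        simp only [pvG_cons, hcl, h0, h1]
        norm_num [List.append_assoc]
      · rw [pvModify2, ih]
        simp only [pvG_cons, hcl, h0, h1, h2]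
        norm_num [List.append_assoc]
      · rw [pvModify3, ih]
        simp only [pvG_cons, hcl, h0, h1, h2, h3]
        norm_num [List.append_assoc]
      · rw [pvModify4, ih]
        simp only [pvG_cons, hcl, h0, h1, h2, h3, h4]
        norm_num [List.append_assoc]
      · rw [pvModify5, ih]
        simp only [pvG_cons, hcl, h0, h1, h2, h3, h4, h5]
        norm_num [List.append_assoc]
      · rw [pvModify6, ih]
        simp only [pvG_cons, hcl, h0, h1, h2, h3, h4, h5, h6]
        norm_num [List.append_assoc]
      · rw [ih]
        simp only [pvG_cons, hcl, h0, h1, h2, h3, h4, h5, h6]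
        norm_num

-- ===== VERDICT (by name: the statement is the Claim_ definition above) =====
theorem group_functions_by_purpose_spec : Claim_equal_group_functions_by_purpose := by
  intro ft _
  unfold Spec_group_functions_by_purpose group_functions_by_purpose group_functions_by_purpose_alt
  simp only []
  rw [show (PySem.Dict.ofList [("dequeue", ([] : List Int)), ("enqueue", []), ("pick_next", []),
      ("task_tick", []), ("select_task_rq", []), ("put_prev", []), ("update_curr", [])])
      = pvMkD [] [] [] [] [] [] [] from rfl, pv_foldA]
  simp only [pvGroupKeys, PySem.List.enumerate_cons, PySem.List.enumerate_nil, List.map_cons,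
    List.map_nil, List.nil_append]
  rfl
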